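-- pv_equiv track=rewrite | github.com/carloslionelxd/Grupo7-Com7 | semana04/desafios/main.py | validar_flotante
-- ===== SOURCE A (Python) =====
-- def validar_flotante(cadena):
--     longitud = len(cadena)
--     contador = 0
--     for letra in cadena:
--         if letra in '0123456789.':
--             contador += 1
--     if contador == longitud:
--         return True
--     else:
--         return False
-- ===== SOURCE B (Python) =====
-- def validar_flotante(cadena):
--     # Strip allowed characters from both ends; the remainder is empty
--     # iff every character of cadena is an allowed character.
--     return cadena.strip('0123456789.') == ''
-- ===== Notes on version B (the rewrite author's own statement) =====
-- stated objective: idiomatic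
-- what changed: Replaces the per-character counting loop compared against len(cadena) with str.strip of the allowed characters from both ends followed by an emptiness test: stripping stops at the first disallowed character from either side, so the remainder is empty exactly when all characters are allowed.
import Mathlib
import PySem

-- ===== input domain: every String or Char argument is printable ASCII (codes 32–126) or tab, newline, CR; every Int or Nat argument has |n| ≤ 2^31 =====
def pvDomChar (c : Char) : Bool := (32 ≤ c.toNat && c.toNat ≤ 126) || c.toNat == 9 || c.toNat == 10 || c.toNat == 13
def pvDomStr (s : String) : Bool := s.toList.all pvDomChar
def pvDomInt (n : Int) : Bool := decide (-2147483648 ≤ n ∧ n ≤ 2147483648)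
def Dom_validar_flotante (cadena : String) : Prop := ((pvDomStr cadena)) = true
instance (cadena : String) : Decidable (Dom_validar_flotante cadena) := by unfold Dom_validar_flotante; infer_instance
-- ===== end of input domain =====

-- B strips the allowed characters from both ends (str.strip('0123456789.')) and tests the remainder for emptiness, instead of counting allowed characters and comparing against the length (idiomatic).

-- ===== PORT A =====
def validar_flotante (cadena : String) : Bool :=
  let longitud := PySem.Str.len cadena
  let contador := cadena.toList.foldl
    (fun contador letra =>
      if List.contains "0123456789.".toList letra then contador + 1 else contador)
    (0 : Int)
  if contador == longitud then true else false

-- ===== PORT B =====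
def validar_flotante_alt (cadena : String) : Bool :=
  PySem.Str.stripChars cadena "0123456789." == ""

-- ===== PRECONDITION & SPEC =====
def Spec_validar_flotante (cadena : String) (out : Bool) : Prop := out = validar_flotante_alt cadena
instance (cadena : String) (out : Bool) : Decidable (Spec_validar_flotante cadena out) := by unfold Spec_validar_flotante; infer_instance

-- ===== CLAIM (what is proved, stated in full; the proofs are below) =====
def Claim_equal_validar_flotante : Prop := ∀ (cadena : String), Dom_validar_flotante cadena → Spec_validar_flotante cadena (validar_flotante cadena)

-- ===== LEMMAS AND PROOFS =====

-- A's counter over a character list: starting from c it ends at c + (count of allowed chars).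
theorem pv_count_foldl (l : List Char) (c : Int) :
    l.foldl (fun contador letra =>
      if List.contains "0123456789.".toList letra then contador + 1 else contador) c
    = c + (l.countP (fun letra => List.contains "0123456789.".toList letra) : Int) := by
  induction l generalizing c with
  | nil => simp
  | cons x xs ih =>
    simp only [List.foldl_cons, List.countP_cons, ih]
    split_ifs with h <;> push_cast <;> ring

theorem pv_count_eq_len_iff (l : List Char) :
    ((l.countP (fun letra => List.contains "0123456789.".toList letra) : Int) = (l.length : Int))
    ↔ ∀ x ∈ l, List.contains "0123456789.".toList x = true := by
  rw [Int.ofNat_inj]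
  exact ⟨fun h x hx => List.countP_eq_length.mp h x hx, List.countP_eq_length.mpr⟩

-- dropWhile p l = [] forces p on all of l; conversely a fully-p list drops to [].
theorem pv_dropWhile_all (p : Char → Bool) (l : List Char)
    (h : ∀ x ∈ l.dropWhile p, p x = true) : ∀ x ∈ l, p x = true := by
  intro x hx
  rw [← List.takeWhile_append_dropWhile (p := p) (l := l)] at hx
  rcases List.mem_append.mp hx with h1 | h2
  · exact List.mem_takeWhile_imp h1
  · exact h x h2

-- B's strip of both ends is empty iff every character is allowed.
theorem pv_stripChars_nil_iff (l chars : List Char) :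
    PySem.Chars.stripChars l chars = [] ↔ ∀ x ∈ l, chars.contains x = true := by
  unfold PySem.Chars.stripChars
  constructor
  · intro h
    have h1 : List.dropWhile (fun c => chars.contains c) (List.dropWhile (fun c => chars.contains c) l).reverse = [] := by
      simpa using h
    have h2 := List.dropWhile_eq_nil_iff.mp h1
    have h3 : ∀ x ∈ List.dropWhile (fun c => chars.contains c) l, chars.contains x = true := by
      intro x hx; exact h2 x (List.mem_reverse.mpr hx)
    exact pv_dropWhile_all _ l h3
  · intro h
    have h1 : List.dropWhile (fun c => chars.contains c) l = [] :=
      List.dropWhile_eq_nil_iff.mpr h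
    show (List.dropWhile _ (List.dropWhile (fun c => chars.contains c) l).reverse).reverse = []
    rw [h1]; rfl

theorem pv_if_beq (a b : Int) : (if a == b then true else false) = true ↔ a = b := by
  by_cases h : a = b <;> simp [h]

-- ===== VERDICT (by name: the statement is the Claim_ definition above) =====
theorem validar_flotante_spec : Claim_equal_validar_flotante := by
  intro cadena _
  unfold Spec_validar_flotante validar_flotante validar_flotante_alt
  have hB : (PySem.Str.stripChars cadena "0123456789." == "") = true
      ↔ ∀ x ∈ cadena.toList, List.contains "0123456789.".toList x = true := by
    rw [beq_iff_eq, ← String.toList_inj, PySem.Str.toList_stripChars]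
    exact pv_stripChars_nil_iff _ _
  simp only [pv_count_foldl, zero_add, PySem.Str.len]
  rw [Bool.eq_iff_iff, hB, ← pv_count_eq_len_iff, pv_if_beq]
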